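-- pv_equiv track=rewrite | github.com/techeer-sv/Do-It-Algorithm-Study | jiwon/code/week15/컬러링북.py | solution
-- ===== SOURCE A (Python) =====
-- def solution(m, n, picture):
--     visited = [[False] * n for _ in range(m)]
--     dx = [-1, 1, 0, 0]
--     dy = [0, 0, -1, 1]
--
--     def dfs(x, y):
--         visited[x][y] = True
--         size = 1
--         for i in range(4):
--             nx, ny = x + dx[i], y + dy[i]
--             if nx < 0 or nx >= m or ny < 0 or ny >= n:
--                 continue
--             if picture[nx][ny] == picture[x][y] and not visited[nx][ny]:
--                 size += dfs(nx, ny)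
--         return size
--
--     numberOfArea = 0
--     maxSizeOfOneArea = 0
--     for i in range(m):
--         for j in range(n):
--             if picture[i][j] != 0 and not visited[i][j]:
--                 numberOfArea += 1
--                 maxSizeOfOneArea = max(maxSizeOfOneArea, dfs(i, j))
--
--     return [numberOfArea, maxSizeOfOneArea]
-- ===== SOURCE B (Python) =====
-- def solution(m, n, picture):
--     count = 0
--     best = 0
--     seen = set()
--     for i in range(m):
--         for j in range(n):
--             if picture[i][j] != 0 and (i, j) not in seen:
--                 comp = {(i, j)}
--                 while True:
--                     nxt = set(comp)
--                     for (x, y) in comp: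
--                         for (a, b) in ((x - 1, y), (x + 1, y), (x, y - 1), (x, y + 1)):
--                             if 0 <= a < m and 0 <= b < n and picture[a][b] == picture[x][y]:
--                                 nxt.add((a, b))
--                     if nxt == comp:
--                         break
--                     comp = nxt
--                 seen |= comp
--                 count += 1
--                 best = max(best, len(comp))
--     return [count, best]
-- ===== Notes on version B (the rewrite author's own statement) =====
-- stated objective: alternative
-- what changed: Recursive depth-first flood fill with a mutable visited matrix is replaced by an iterative fixed-point saturation: each region is grown as a set of coordinates by repeatedly adding equal-colored in-bounds neighbors until the set stops changing; no recursion and no per-cell boolean grid.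
import Mathlib
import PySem

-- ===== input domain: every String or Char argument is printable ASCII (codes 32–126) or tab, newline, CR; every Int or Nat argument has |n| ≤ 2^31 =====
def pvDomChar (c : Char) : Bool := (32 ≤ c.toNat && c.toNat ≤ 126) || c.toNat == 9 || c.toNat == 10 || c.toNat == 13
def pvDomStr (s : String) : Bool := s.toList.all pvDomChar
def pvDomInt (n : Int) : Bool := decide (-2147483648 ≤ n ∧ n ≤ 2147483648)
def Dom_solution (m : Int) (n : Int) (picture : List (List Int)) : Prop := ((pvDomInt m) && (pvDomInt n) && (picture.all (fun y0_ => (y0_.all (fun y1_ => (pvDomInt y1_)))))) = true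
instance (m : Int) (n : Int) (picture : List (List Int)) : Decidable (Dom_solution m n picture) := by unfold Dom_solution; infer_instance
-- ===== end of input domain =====

-- B replaces A's recursive depth-first flood fill (mutable visited matrix) by an iterative
-- fixed-point saturation growing each region as a coordinate set; equivalence of the RETURN value.

-- ===== PORT A =====
-- picture[x][y]; Pre_solution keeps every evaluated access in range, so the .getD defaults are never hit there
def colA (picture : List (List Int)) (x y : Int) : Int :=
  (PySem.List.pyGet? ((PySem.List.pyGet? picture x).getD []) y).getD 0

-- one iteration of A's `for i in range(4)` body; `rec` is the recursive dfs call
def dfsStep (m n : Int) (picture : List (List Int))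
    (rec : Int → Int → Finset (Int × Int) → Int × Finset (Int × Int))
    (x y : Int) (acc : Int × Finset (Int × Int)) (d : Int × Int) : Int × Finset (Int × Int) :=
  if x + d.1 < 0 ∨ m ≤ x + d.1 ∨ y + d.2 < 0 ∨ n ≤ y + d.2 then acc
  else if colA picture (x + d.1) (y + d.2) = colA picture x y ∧ (x + d.1, y + d.2) ∉ acc.2 then
    (acc.1 + (rec (x + d.1) (y + d.2) acc.2).1, (rec (x + d.1) (y + d.2) acc.2).2)
  else acc

-- A's dfs; the visited matrix is the set of True cells; fuel only totalizes the recursion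
def dfsA (m n : Int) (picture : List (List Int)) :
    Nat → Int → Int → Finset (Int × Int) → Int × Finset (Int × Int)
  | 0, _, _, V => (0, V)
  | fuel + 1, x, y, V =>
    List.foldl (dfsStep m n picture (dfsA m n picture fuel) x y)
      (1, insert (x, y) V) [((-1 : Int), (0 : Int)), (1, 0), (0, -1), (0, 1)]

-- body of A's inner loop over j: state = (numberOfArea, maxSizeOfOneArea, visited)
def bodyA (m n : Int) (picture : List (List Int))
    (st : Int × Int × Finset (Int × Int)) (i j : Int) : Int × Int × Finset (Int × Int) :=
  if colA picture i j ≠ 0 ∧ (i, j) ∉ st.2.2 then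
    let t := dfsA m n picture (m.toNat * n.toNat + 1) i j st.2.2
    (st.1 + 1, max st.2.1 t.1, t.2)
  else st

def solution (m : Int) (n : Int) (picture : List (List Int)) : List Int :=
  let r := List.foldl (fun st i =>
      List.foldl (fun st j => bodyA m n picture st i j) st (PySem.List.pyRange 0 n 1))
    ((0 : Int), (0 : Int), (∅ : Finset (Int × Int))) (PySem.List.pyRange 0 m 1)
  [r.1, r.2.1]

-- ===== PORT B =====
def colB (picture : List (List Int)) (x y : Int) : Int :=
  (PySem.List.pyGet? ((PySem.List.pyGet? picture x).getD []) y).getD 0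

-- in-bounds equal-colored neighbors of one cell (B's inner `for (a,b) in …` filter)
def nbrsB (m n : Int) (picture : List (List Int)) (c : Int × Int) : Finset (Int × Int) :=
  ({(c.1 - 1, c.2), (c.1 + 1, c.2), (c.1, c.2 - 1), (c.1, c.2 + 1)} : Finset (Int × Int)).filter
    (fun d => 0 ≤ d.1 ∧ d.1 < m ∧ 0 ≤ d.2 ∧ d.2 < n ∧ colB picture d.1 d.2 = colB picture c.1 c.2)

-- one round of B's while-loop: nxt = comp ∪ neighbors(comp)
def expandB (m n : Int) (picture : List (List Int)) (S : Finset (Int × Int)) : Finset (Int × Int) :=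
  S ∪ S.biUnion (nbrsB m n picture)

-- B's `while True` saturation; fuel only totalizes the loop (it reaches the fixed point first)
def satB (m n : Int) (picture : List (List Int)) : Nat → Finset (Int × Int) → Finset (Int × Int)
  | 0, S => S
  | fuel + 1, S =>
    let S' := expandB m n picture S
    if S' = S then S else satB m n picture fuel S'

-- body of B's inner loop over j: state = (count, best, seen)
def bodyB (m n : Int) (picture : List (List Int))
    (st : Int × Int × Finset (Int × Int)) (i j : Int) : Int × Int × Finset (Int × Int) :=
  if colB picture i j ≠ 0 ∧ (i, j) ∉ st.2.2 then
    let comp := satB m n picture (m.toNat * n.toNat + 1) {(i, j)}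
    (st.1 + 1, max st.2.1 (comp.card : Int), st.2.2 ∪ comp)
  else st

def solution_alt (m : Int) (n : Int) (picture : List (List Int)) : List Int :=
  let r := List.foldl (fun st i =>
      List.foldl (fun st j => bodyB m n picture st i j) st (PySem.List.pyRange 0 n 1))
    ((0 : Int), (0 : Int), (∅ : Finset (Int × Int))) (PySem.List.pyRange 0 m 1)
  [r.1, r.2.1]

-- ===== PRECONDITION & SPEC =====
-- Pre_ excludes exactly the inputs where Python A raises IndexError: a positive grid asked for
-- beyond the actual extent of `picture` (m rows, each of the first m rows at least n wide).
def Pre_solution (m : Int) (n : Int) (picture : List (List Int)) : Prop :=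
  m ≤ 0 ∨ n ≤ 0 ∨ (m ≤ (picture.length : Int) ∧
    ∀ row ∈ picture.take m.toNat, n ≤ (row.length : Int))
instance (m : Int) (n : Int) (picture : List (List Int)) : Decidable (Pre_solution m n picture) := by
  unfold Pre_solution; infer_instance

def pvWitness_solution : Int × Int × List (List Int) := (2, 2, [[1, 1], [0, 2]])

def Spec_solution (m : Int) (n : Int) (picture : List (List Int)) (out : List Int) : Prop := out = solution_alt m n picture
instance (m : Int) (n : Int) (picture : List (List Int)) (out : List Int) : Decidable (Spec_solution m n picture out) := by unfold Spec_solution; infer_instance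

-- ===== CLAIM (what is proved, stated in full; the proofs are below) =====
def Claim_equal_solution : Prop := ∀ (m : Int) (n : Int) (picture : List (List Int)), Dom_solution m n picture → Pre_solution m n picture → Spec_solution m n picture (solution m n picture)

-- ===== LEMMAS AND PROOFS =====

-- the grid of cells, adjacency, and the same-colored-neighbor step relation
noncomputable def Gd (m n : Int) : Finset (Int × Int) :=
  Finset.Icc (0 : Int) (m - 1) ×ˢ Finset.Icc (0 : Int) (n - 1)

def AdjP (c d : Int × Int) : Prop :=
  (d.1 = c.1 - 1 ∧ d.2 = c.2) ∨ (d.1 = c.1 + 1 ∧ d.2 = c.2) ∨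
  (d.1 = c.1 ∧ d.2 = c.2 - 1) ∨ (d.1 = c.1 ∧ d.2 = c.2 + 1)

def StepR (m n : Int) (picture : List (List Int)) (c d : Int × Int) : Prop :=
  c ∈ Gd m n ∧ d ∈ Gd m n ∧ AdjP c d ∧ colA picture d.1 d.2 = colA picture c.1 c.2

def StepAv (m n : Int) (picture : List (List Int)) (V : Finset (Int × Int)) (c d : Int × Int) : Prop :=
  StepR m n picture c d ∧ d ∉ V

-- cells reachable from c by steps avoiding V (proof-side only, classical)
noncomputable def ReachAv (m n : Int) (picture : List (List Int)) (V : Finset (Int × Int))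
    (c : Int × Int) : Finset (Int × Int) :=
  @Finset.filter _ (fun d => Relation.ReflTransGen (StepAv m n picture V) c d)
    (Classical.decPred _) (Gd m n)

-- closure of a set of cells under the step relation (proof-side only, classical)
noncomputable def ClS (m n : Int) (picture : List (List Int)) (S : Finset (Int × Int)) : Finset (Int × Int) :=
  @Finset.filter _ (fun d => ∃ c ∈ S, Relation.ReflTransGen (StepR m n picture) c d)
    (Classical.decPred _) (Gd m n)

theorem mem_Gd (m n : Int) (c : Int × Int) :
    c ∈ Gd m n ↔ 0 ≤ c.1 ∧ c.1 < m ∧ 0 ≤ c.2 ∧ c.2 < n := by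
  simp only [Gd, Finset.mem_product, Finset.mem_Icc]
  omega

theorem adjP_symm {c d : Int × Int} (h : AdjP c d) : AdjP d c := by
  unfold AdjP at *; omega

theorem stepR_symm {m n : Int} {picture : List (List Int)} {c d : Int × Int}
    (h : StepR m n picture c d) : StepR m n picture d c := by
  obtain ⟨h1, h2, h3, h4⟩ := h
  exact ⟨h2, h1, adjP_symm h3, h4.symm⟩

theorem mem_ReachAv {m n : Int} {picture : List (List Int)} {V : Finset (Int × Int)}
    {c d : Int × Int} :
    d ∈ ReachAv m n picture V c ↔
      d ∈ Gd m n ∧ Relation.ReflTransGen (StepAv m n picture V) c d := by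
  simp [ReachAv, Finset.mem_filter]

theorem reach_self {m n : Int} {picture : List (List Int)} {V : Finset (Int × Int)}
    {c : Int × Int} (hc : c ∈ Gd m n) : c ∈ ReachAv m n picture V c :=
  mem_ReachAv.2 ⟨hc, Relation.ReflTransGen.refl⟩

theorem reach_closed {m n : Int} {picture : List (List Int)} {V : Finset (Int × Int)}
    {c x y : Int × Int} (hx : x ∈ ReachAv m n picture V c)
    (hxy : StepAv m n picture V x y) : y ∈ ReachAv m n picture V c := by
  rcases mem_ReachAv.1 hx with ⟨_, hr⟩
  exact mem_ReachAv.2 ⟨hxy.1.2.1, hr.tail hxy⟩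

theorem reach_trans {m n : Int} {picture : List (List Int)} {V : Finset (Int × Int)}
    {c x : Int × Int} (hx : x ∈ ReachAv m n picture V c) :
    ReachAv m n picture V x ⊆ ReachAv m n picture V c := by
  intro d hd
  rcases mem_ReachAv.1 hx with ⟨_, hcx⟩
  rcases mem_ReachAv.1 hd with ⟨hdG, hxd⟩
  exact mem_ReachAv.2 ⟨hdG, hcx.trans hxd⟩

theorem reach_mono {m n : Int} {picture : List (List Int)} {V W : Finset (Int × Int)}
    (hVW : V ⊆ W) (c : Int × Int) :
    ReachAv m n picture W c ⊆ ReachAv m n picture V c := by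
  intro d hd
  rcases mem_ReachAv.1 hd with ⟨hdG, hr⟩
  refine mem_ReachAv.2 ⟨hdG, hr.mono ?_⟩
  exact fun a b hab => ⟨hab.1, fun hb => hab.2 (hVW hb)⟩

theorem reach_notin {m n : Int} {picture : List (List Int)} {V : Finset (Int × Int)}
    {c d : Int × Int} (hc : c ∉ V) (hd : d ∈ ReachAv m n picture V c) : d ∉ V := by
  rcases mem_ReachAv.1 hd with ⟨_, hr⟩
  rcases hr.cases_tail with h | ⟨e, _, he⟩
  · exact h ▸ hc
  · exact he.2

theorem reach_step {m n : Int} {picture : List (List Int)} {V : Finset (Int × Int)}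
    {c b : Int × Int} (h : StepAv m n picture V c b) :
    ReachAv m n picture V b ⊆ ReachAv m n picture V c :=
  reach_trans (reach_closed (reach_self h.1.1) h)

theorem reach_subset_gd {m n : Int} {picture : List (List Int)} {V : Finset (Int × Int)}
    {c : Int × Int} : ReachAv m n picture V c ⊆ Gd m n :=
  fun d hd => (mem_ReachAv.1 hd).1

theorem adjP_cases {c y : Int × Int} (h : AdjP c y) :
    (y.1 = c.1 + (-1 : Int) ∧ y.2 = c.2 + (0 : Int)) ∨ (y.1 = c.1 + 1 ∧ y.2 = c.2 + 0) ∨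
    (y.1 = c.1 + 0 ∧ y.2 = c.2 + (-1)) ∨ (y.1 = c.1 + 0 ∧ y.2 = c.2 + 1) := by
  unfold AdjP at h; omega

-- invariant of A's four-direction fold inside dfs, relative to the V at the top of the call
def InvD (m n : Int) (picture : List (List Int)) (V : Finset (Int × Int)) (c : Int × Int)
    (st : Int × Finset (Int × Int)) : Prop :=
  insert c V ⊆ st.2 ∧ st.2 ⊆ Gd m n ∧
  st.2 ⊆ V ∪ ReachAv m n picture V c ∧
  st.1 = (((st.2 \ V).card : Nat) : Int) ∧
  (∀ x ∈ st.2, x ≠ c → x ∉ V → ∀ y, StepR m n picture x y → y ∉ V → y ∈ st.2)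

theorem card_sdiff_insert_lt {m n : Int} {V W : Finset (Int × Int)} {c : Int × Int}
    (hW : insert c V ⊆ W) (hc : c ∈ Gd m n) (hcV : c ∉ V) {fuel : Nat}
    (h : (Gd m n \ V).card < fuel + 1) : (Gd m n \ W).card < fuel := by
  have h1 : Gd m n \ W ⊆ (Gd m n \ V).erase c := by
    intro x hx
    rcases Finset.mem_sdiff.1 hx with ⟨hxg, hxw⟩
    refine Finset.mem_erase.2 ⟨?_, Finset.mem_sdiff.2 ⟨hxg, fun hv => hxw (hW (Finset.mem_insert_of_mem hv))⟩⟩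
    rintro rfl
    exact hxw (hW (Finset.mem_insert_self _ _))
  have h2 := Finset.card_le_card h1
  have h3 : c ∈ Gd m n \ V := Finset.mem_sdiff.2 ⟨hc, hcV⟩
  have h4 := Finset.card_erase_of_mem h3
  rw [h4] at h2
  have h5 : 0 < (Gd m n \ V).card := Finset.card_pos.2 ⟨c, h3⟩
  omega

theorem dfsStep_spec (m n : Int) (picture : List (List Int)) (fuel : Nat)
    (V : Finset (Int × Int)) (c : Int × Int)
    (hc : c ∈ Gd m n) (hcV : c ∉ V) (hfuel : (Gd m n \ V).card < fuel + 1)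
    (ih : ∀ (V' : Finset (Int × Int)) (c' : Int × Int), V' ⊆ Gd m n → c' ∈ Gd m n → c' ∉ V' →
      (Gd m n \ V').card < fuel →
      dfsA m n picture fuel c'.1 c'.2 V' =
        (((ReachAv m n picture V' c').card : Int), V' ∪ ReachAv m n picture V' c'))
    (st : Int × Finset (Int × Int)) (d : Int × Int)
    (hd : AdjP c (c.1 + d.1, c.2 + d.2))
    (hInv : InvD m n picture V c st) :
    InvD m n picture V c (dfsStep m n picture (dfsA m n picture fuel) c.1 c.2 st d) ∧
    st.2 ⊆ (dfsStep m n picture (dfsA m n picture fuel) c.1 c.2 st d).2 ∧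
    (∀ y : Int × Int, StepR m n picture c y → y ∉ V →
      y.1 = c.1 + d.1 → y.2 = c.2 + d.2 →
      y ∈ (dfsStep m n picture (dfsA m n picture fuel) c.1 c.2 st d).2) := by
  obtain ⟨hsub, hGd, hsub3, hs, hclo⟩ := hInv
  rw [dfsStep]
  by_cases h1 : c.1 + d.1 < 0 ∨ m ≤ c.1 + d.1 ∨ c.2 + d.2 < 0 ∨ n ≤ c.2 + d.2
  · rw [if_pos h1]
    refine ⟨⟨hsub, hGd, hsub3, hs, hclo⟩, fun a ha => ha, ?_⟩
    intro y hy _ hy1 hy2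
    have hyG := (mem_Gd m n y).1 hy.2.1
    omega
  · rw [if_neg h1]
    push_neg at h1
    have hnbG : (c.1 + d.1, c.2 + d.2) ∈ Gd m n := (mem_Gd m n _).2 (by omega)
    by_cases h2 : colA picture (c.1 + d.1) (c.2 + d.2) = colA picture c.1 c.2 ∧
        (c.1 + d.1, c.2 + d.2) ∉ st.2
    · rw [if_pos h2]
      have hVst : V ⊆ st.2 := fun v hv => hsub (Finset.mem_insert_of_mem hv)
      have hnbV : (c.1 + d.1, c.2 + d.2) ∉ V := fun hv => h2.2 (hVst hv)
      have hcall := ih st.2 (c.1 + d.1, c.2 + d.2) hGd hnbG h2.2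
        (card_sdiff_insert_lt hsub hc hcV hfuel)
      dsimp only at hcall
      rw [hcall]
      dsimp only
      have hstepc : StepAv m n picture V c (c.1 + d.1, c.2 + d.2) :=
        ⟨⟨hc, hnbG, hd, h2.1⟩, hnbV⟩
      have hRst : ∀ z ∈ ReachAv m n picture st.2 (c.1 + d.1, c.2 + d.2), z ∉ st.2 :=
        fun z hz => reach_notin h2.2 hz
      have hRV : ∀ z ∈ ReachAv m n picture st.2 (c.1 + d.1, c.2 + d.2), z ∉ V :=
        fun z hz hv => hRst z hz (hVst hv)
      have hRreach : ReachAv m n picture st.2 (c.1 + d.1, c.2 + d.2) ⊆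
          ReachAv m n picture V c :=
        fun z hz => reach_step hstepc (reach_mono hVst _ hz)
      refine ⟨⟨?_, ?_, ?_, ?_, ?_⟩, ?_, ?_⟩
      · exact hsub.trans Finset.subset_union_left
      · exact Finset.union_subset hGd reach_subset_gd
      · intro z hz
        rcases Finset.mem_union.1 hz with hz' | hz'
        · exact hsub3 hz'
        · exact Finset.mem_union_right _ (hRreach hz')
      · have hU : (st.2 ∪ ReachAv m n picture st.2 (c.1 + d.1, c.2 + d.2)) \ V =
            (st.2 \ V) ∪ ReachAv m n picture st.2 (c.1 + d.1, c.2 + d.2) := by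
          ext z
          simp only [Finset.mem_sdiff, Finset.mem_union]
          constructor
          · rintro ⟨hz1 | hz1, hz2⟩
            · exact Or.inl ⟨hz1, hz2⟩
            · exact Or.inr hz1
          · rintro (⟨hz1, hz2⟩ | hz1)
            · exact ⟨Or.inl hz1, hz2⟩
            · exact ⟨Or.inr hz1, hRV z hz1⟩
        have hdisj : Disjoint (st.2 \ V) (ReachAv m n picture st.2 (c.1 + d.1, c.2 + d.2)) :=
          Finset.disjoint_left.2 (fun {z} hz1 hz2 => hRst z hz2 (Finset.mem_sdiff.1 hz1).1)
        rw [hU, Finset.card_union_of_disjoint hdisj, hs]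
        push_cast
        ring
      · intro x hx hxc hxV y hy hyV
        rcases Finset.mem_union.1 hx with hx' | hx'
        · exact Finset.mem_union_left _ (hclo x hx' hxc hxV y hy hyV)
        · by_cases hy2 : y ∈ st.2
          · exact Finset.mem_union_left _ hy2
          · exact Finset.mem_union_right _ (reach_closed hx' ⟨hy, hy2⟩)
      · exact Finset.subset_union_left
      · intro y hy hyV hy1 hy2
        have hynb : y = (c.1 + d.1, c.2 + d.2) := Prod.ext hy1 hy2
        subst hynb
        exact Finset.mem_union_right _ (reach_self hnbG)
    · rw [if_neg h2]
      refine ⟨⟨hsub, hGd, hsub3, hs, hclo⟩, fun a ha => ha, ?_⟩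
      intro y hy hyV hy1 hy2
      have hynb : y = (c.1 + d.1, c.2 + d.2) := Prod.ext hy1 hy2
      subst hynb
      push_neg at h2
      exact h2 hy.2.2.2

theorem dfsA_spec (m n : Int) (picture : List (List Int)) :
    ∀ (fuel : Nat) (V : Finset (Int × Int)) (c : Int × Int),
      V ⊆ Gd m n → c ∈ Gd m n → c ∉ V → (Gd m n \ V).card < fuel →
      dfsA m n picture fuel c.1 c.2 V =
        (((ReachAv m n picture V c).card : Int), V ∪ ReachAv m n picture V c) := by
  intro fuel
  induction fuel with
  | zero => exact fun V c _ _ _ h => absurd h (by omega)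
  | succ fuel ih =>
    intro V c hV hc hcV hfuel
    have hins : insert c V \ V = {c} := by
      ext z
      simp only [Finset.mem_sdiff, Finset.mem_insert, Finset.mem_singleton]
      constructor
      · rintro ⟨rfl | hz, hzv⟩
        · rfl
        · exact (hzv hz).elim
      · rintro rfl
        exact ⟨Or.inl rfl, hcV⟩
    have hInv0 : InvD m n picture V c (1, insert c V) := by
      refine ⟨fun a ha => ha, Finset.insert_subset hc hV, ?_, ?_, ?_⟩
      · intro z hz
        rcases Finset.mem_insert.1 hz with rfl | hz'
        · exact Finset.mem_union_right _ (reach_self hc)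
        · exact Finset.mem_union_left _ hz'
      · show (1 : Int) = _
        rw [hins, Finset.card_singleton, Nat.cast_one]
      · intro x hx hxc hxV y _ _
        rcases Finset.mem_insert.1 hx with rfl | hx'
        · exact absurd rfl hxc
        · exact absurd hx' hxV
    have a1 : AdjP c (c.1 + (-1 : Int), c.2 + (0 : Int)) := by unfold AdjP; dsimp only; omega
    have a2 : AdjP c (c.1 + (1 : Int), c.2 + (0 : Int)) := by unfold AdjP; dsimp only; omega
    have a3 : AdjP c (c.1 + (0 : Int), c.2 + (-1 : Int)) := by unfold AdjP; dsimp only; omega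
    have a4 : AdjP c (c.1 + (0 : Int), c.2 + (1 : Int)) := by unfold AdjP; dsimp only; omega
    have hunf : dfsA m n picture (fuel + 1) c.1 c.2 V =
        dfsStep m n picture (dfsA m n picture fuel) c.1 c.2
          (dfsStep m n picture (dfsA m n picture fuel) c.1 c.2
            (dfsStep m n picture (dfsA m n picture fuel) c.1 c.2
              (dfsStep m n picture (dfsA m n picture fuel) c.1 c.2
                (1, insert c V) ((-1 : Int), (0 : Int)))
              ((1 : Int), (0 : Int)))
            ((0 : Int), (-1 : Int)))
          ((0 : Int), (1 : Int)) := by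
      simp only [dfsA, List.foldl, Prod.mk.eta]
    rw [hunf]
    have h1 := dfsStep_spec m n picture fuel V c hc hcV hfuel ih
      (1, insert c V) ((-1 : Int), (0 : Int)) a1 hInv0
    have h2 := dfsStep_spec m n picture fuel V c hc hcV hfuel ih
      _ ((1 : Int), (0 : Int)) a2 h1.1
    have h3 := dfsStep_spec m n picture fuel V c hc hcV hfuel ih
      _ ((0 : Int), (-1 : Int)) a3 h2.1
    have h4 := dfsStep_spec m n picture fuel V c hc hcV hfuel ih
      _ ((0 : Int), (1 : Int)) a4 h3.1
    obtain ⟨hs4sub, hs4Gd, hs4sub3, hs4card, hs4clo⟩ := h4.1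
    have d1 := fun y hy hyV e1 e2 => h4.2.1 (h3.2.1 (h2.2.1 (h1.2.2 y hy hyV e1 e2)))
    have d2 := fun y hy hyV e1 e2 => h4.2.1 (h3.2.1 (h2.2.2 y hy hyV e1 e2))
    have d3 := fun y hy hyV e1 e2 => h4.2.1 (h3.2.2 y hy hyV e1 e2)
    have d4 := h4.2.2
    have key : ∀ e, Relation.ReflTransGen (StepAv m n picture V) c e →
        e ∈ (dfsStep m n picture (dfsA m n picture fuel) c.1 c.2
          (dfsStep m n picture (dfsA m n picture fuel) c.1 c.2
            (dfsStep m n picture (dfsA m n picture fuel) c.1 c.2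
              (dfsStep m n picture (dfsA m n picture fuel) c.1 c.2
                (1, insert c V) ((-1 : Int), (0 : Int)))
              ((1 : Int), (0 : Int)))
            ((0 : Int), (-1 : Int)))
          ((0 : Int), (1 : Int))).2 ∧ e ∉ V := by
      intro e he
      induction he with
      | refl => exact ⟨hs4sub (Finset.mem_insert_self c V), hcV⟩
      | @tail b e hab hbe ih2 =>
        obtain ⟨hbW, hbV⟩ := ih2
        have heV : e ∉ V := hbe.2
        by_cases hbc : b = c
        · subst hbc
          rcases adjP_cases hbe.1.2.2.1 with ⟨e1, e2⟩ | ⟨e1, e2⟩ | ⟨e1, e2⟩ | ⟨e1, e2⟩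
          · exact ⟨d1 e hbe.1 heV e1 e2, heV⟩
          · exact ⟨d2 e hbe.1 heV e1 e2, heV⟩
          · exact ⟨d3 e hbe.1 heV e1 e2, heV⟩
          · exact ⟨d4 e hbe.1 heV e1 e2, heV⟩
        · exact ⟨hs4clo b hbW hbc hbV e hbe.1 heV, heV⟩
    have hW : (dfsStep m n picture (dfsA m n picture fuel) c.1 c.2
          (dfsStep m n picture (dfsA m n picture fuel) c.1 c.2
            (dfsStep m n picture (dfsA m n picture fuel) c.1 c.2
              (dfsStep m n picture (dfsA m n picture fuel) c.1 c.2
                (1, insert c V) ((-1 : Int), (0 : Int)))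
              ((1 : Int), (0 : Int)))
            ((0 : Int), (-1 : Int)))
          ((0 : Int), (1 : Int))).2 = V ∪ ReachAv m n picture V c := by
      apply Finset.Subset.antisymm hs4sub3
      intro z hz
      rcases Finset.mem_union.1 hz with hz' | hz'
      · exact hs4sub (Finset.mem_insert_of_mem hz')
      · exact (key z (mem_ReachAv.1 hz').2).1
    have hsd : (V ∪ ReachAv m n picture V c) \ V = ReachAv m n picture V c := by
      ext z
      simp only [Finset.mem_sdiff, Finset.mem_union]
      constructor
      · rintro ⟨hz | hz, hzv⟩
        · exact (hzv hz).elim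
        · exact hz
      · intro hz
        exact ⟨Or.inr hz, reach_notin hcV hz⟩
    refine Prod.ext ?_ hW
    rw [hs4card]
    dsimp only
    rw [hW, hsd]

-- ===== B side: saturation computes the closure =====

theorem mem_ClS {m n : Int} {picture : List (List Int)} {S : Finset (Int × Int)} {d : Int × Int} :
    d ∈ ClS m n picture S ↔
      d ∈ Gd m n ∧ ∃ c ∈ S, Relation.ReflTransGen (StepR m n picture) c d := by
  simp [ClS, Finset.mem_filter]

theorem subset_clS {m n : Int} {picture : List (List Int)} {S : Finset (Int × Int)}
    (hS : S ⊆ Gd m n) : S ⊆ ClS m n picture S :=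
  fun c hc => mem_ClS.2 ⟨hS hc, c, hc, Relation.ReflTransGen.refl⟩

theorem clS_closed {m n : Int} {picture : List (List Int)} {S : Finset (Int × Int)}
    {x y : Int × Int} (hx : x ∈ ClS m n picture S) (hxy : StepR m n picture x y) :
    y ∈ ClS m n picture S := by
  rcases mem_ClS.1 hx with ⟨_, c, hcS, hr⟩
  exact mem_ClS.2 ⟨hxy.2.1, c, hcS, hr.tail hxy⟩

theorem clS_min {m n : Int} {picture : List (List Int)} {S T : Finset (Int × Int)}
    (hST : S ⊆ T) (hT : ∀ x ∈ T, ∀ y, StepR m n picture x y → y ∈ T) :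
    ClS m n picture S ⊆ T := by
  intro d hd
  obtain ⟨-, c, hcS, hr⟩ := mem_ClS.1 hd
  clear hd
  induction hr with
  | refl => exact hST hcS
  | tail _ h ih => exact hT _ ih _ h

theorem clS_of_subset_clS {m n : Int} {picture : List (List Int)} {S T : Finset (Int × Int)}
    (h : T ⊆ ClS m n picture S) : ClS m n picture T ⊆ ClS m n picture S :=
  clS_min h (fun _ hx _ hxy => clS_closed hx hxy)

theorem clS_mono {m n : Int} {picture : List (List Int)} {S T : Finset (Int × Int)}
    (h : S ⊆ T) : ClS m n picture S ⊆ ClS m n picture T := by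
  intro d hd
  rcases mem_ClS.1 hd with ⟨hdG, c, hcS, hr⟩
  exact mem_ClS.2 ⟨hdG, c, h hcS, hr⟩

theorem colB_eq_colA : colB = colA := rfl

theorem mem_nbrsB {m n : Int} {picture : List (List Int)} {x y : Int × Int}
    (hx : x ∈ Gd m n) : y ∈ nbrsB m n picture x ↔ StepR m n picture x y := by
  simp only [nbrsB, Finset.mem_filter, Finset.mem_insert, Finset.mem_singleton, StepR, AdjP,
    Prod.ext_iff, mem_Gd, colB_eq_colA, hx, true_and]
  have hxg := (mem_Gd m n x).1 hx
  constructor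
  · rintro ⟨hm, h1, h2, h3, h4, h5⟩
    exact ⟨⟨h1, h2, h3, h4⟩, by omega, h5⟩
  · rintro ⟨⟨h1, h2, h3, h4⟩, hm, h5⟩
    exact ⟨by omega, h1, h2, h3, h4, h5⟩

theorem expandB_spec {m n : Int} {picture : List (List Int)} {S : Finset (Int × Int)}
    {y : Int × Int} : y ∈ expandB m n picture S ↔ y ∈ S ∨ ∃ x ∈ S, y ∈ nbrsB m n picture x := by
  simp [expandB, Finset.mem_union, Finset.mem_biUnion]

theorem satB_spec (m n : Int) (picture : List (List Int)) :
    ∀ (fuel : Nat) (S : Finset (Int × Int)), S ⊆ Gd m n → (Gd m n \ S).card < fuel →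
      satB m n picture fuel S = ClS m n picture S := by
  intro fuel
  induction fuel with
  | zero => exact fun S _ h => absurd h (by omega)
  | succ fuel ih =>
    intro S hS h
    rw [satB]
    by_cases hfix : expandB m n picture S = S
    · rw [if_pos hfix]
      refine Finset.Subset.antisymm (subset_clS hS) (clS_min (fun x hx => hx) ?_)
      intro x hx y hxy
      rw [← hfix]
      exact expandB_spec.2 (Or.inr ⟨x, hx, (mem_nbrsB (hS hx)).2 hxy⟩)
    · rw [if_neg hfix]
      have hsub : S ⊆ expandB m n picture S := Finset.subset_union_left
      have hexp_gd : expandB m n picture S ⊆ Gd m n := by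
        intro y hy
        rcases expandB_spec.1 hy with h' | ⟨x, hx, hnb⟩
        · exact hS h'
        · exact ((mem_nbrsB (hS hx)).1 hnb).2.1
      have hexp_cl : expandB m n picture S ⊆ ClS m n picture S := by
        intro y hy
        rcases expandB_spec.1 hy with h' | ⟨x, hx, hnb⟩
        · exact subset_clS hS h'
        · exact clS_closed (subset_clS hS hx) ((mem_nbrsB (hS hx)).1 hnb)
      have hss : S ⊂ expandB m n picture S := hsub.ssubset_of_ne (Ne.symm hfix)
      obtain ⟨z, hz1, hz2⟩ := Finset.exists_of_ssubset hss
      have hcard : (Gd m n \ expandB m n picture S).card < (Gd m n \ S).card := by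
        apply Finset.card_lt_card
        rw [Finset.ssubset_def]
        constructor
        · exact Finset.sdiff_subset_sdiff (fun a ha => ha) hsub
        · intro habs
          have := habs (Finset.mem_sdiff.2 ⟨hexp_gd hz1, hz2⟩)
          exact (Finset.mem_sdiff.1 this).2 hz1
      rw [ih _ hexp_gd (by omega)]
      exact Finset.Subset.antisymm (clS_of_subset_clS hexp_cl) (clS_mono hsub)

-- ===== outer loops =====

-- the seen/visited set is a union of whole regions: closed under the step relation
def InvO (m n : Int) (picture : List (List Int)) (V : Finset (Int × Int)) : Prop :=
  V ⊆ Gd m n ∧ ∀ x ∈ V, ∀ y, StepR m n picture x y → y ∈ V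

theorem reachAv_empty_of_closed {m n : Int} {picture : List (List Int)} {V : Finset (Int × Int)}
    {c : Int × Int} (hV : ∀ x ∈ V, ∀ y, StepR m n picture x y → y ∈ V) (hc : c ∉ V) :
    ReachAv m n picture V c = ReachAv m n picture ∅ c := by
  have key : ∀ d, Relation.ReflTransGen (StepAv m n picture ∅) c d →
      Relation.ReflTransGen (StepAv m n picture V) c d ∧ d ∉ V := by
    intro d hr
    induction hr with
    | refl => exact ⟨Relation.ReflTransGen.refl, hc⟩
    | tail _ hstep ih =>
      obtain ⟨hrw, hxV⟩ := ih
      have hyV : _ ∉ V := fun hy => hxV (hV _ hy _ (stepR_symm hstep.1))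
      exact ⟨hrw.tail ⟨hstep.1, hyV⟩, hyV⟩
  apply Finset.Subset.antisymm
  · exact reach_mono (Finset.empty_subset V) c
  · intro d hd
    rcases mem_ReachAv.1 hd with ⟨hdG, hr⟩
    exact mem_ReachAv.2 ⟨hdG, (key d hr).1⟩

theorem clS_singleton {m n : Int} {picture : List (List Int)} {c : Int × Int} :
    ClS m n picture {c} = ReachAv m n picture ∅ c := by
  ext d
  rw [mem_ClS, mem_ReachAv]
  constructor
  · rintro ⟨hg, x, hx, hr⟩
    rw [Finset.mem_singleton] at hx
    subst hx
    exact ⟨hg, hr.mono (fun a b hab => ⟨hab, by simp⟩)⟩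
  · rintro ⟨hg, hr⟩
    exact ⟨hg, c, Finset.mem_singleton_self c, hr.mono (fun a b hab => hab.1)⟩

theorem card_Gd (m n : Int) : (Gd m n).card = m.toNat * n.toNat := by
  rw [Gd, Finset.card_product, Int.card_Icc, Int.card_Icc]
  congr 1 <;> omega

theorem cell_step (m n : Int) (picture : List (List Int)) (st : Int × Int × Finset (Int × Int))
    (i j : Int) (hij : (i, j) ∈ Gd m n) (hInv : InvO m n picture st.2.2) :
    bodyA m n picture st i j = bodyB m n picture st i j ∧
    InvO m n picture (bodyA m n picture st i j).2.2 := by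
  obtain ⟨hVg, hVcl⟩ := hInv
  rw [bodyA, bodyB, colB_eq_colA]
  by_cases hcond : colA picture i j ≠ 0 ∧ (i, j) ∉ st.2.2
  · rw [if_pos hcond, if_pos hcond]
    have hcard : (Gd m n \ st.2.2).card < m.toNat * n.toNat + 1 := by
      have h1 := Finset.card_le_card (Finset.sdiff_subset (s := Gd m n) (t := st.2.2))
      have h2 := card_Gd m n
      omega
    have hcard1 : (Gd m n \ ({(i, j)} : Finset (Int × Int))).card < m.toNat * n.toNat + 1 := by
      have h1 := Finset.card_le_card (Finset.sdiff_subset (s := Gd m n) (t := ({(i, j)} : Finset (Int × Int))))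
      have h2 := card_Gd m n
      omega
    have hA := dfsA_spec m n picture (m.toNat * n.toNat + 1) st.2.2 (i, j) hVg hij hcond.2 hcard
    have hB := satB_spec m n picture (m.toNat * n.toNat + 1) {(i, j)}
      (Finset.singleton_subset_iff.2 hij) hcard1
    have hR : ReachAv m n picture st.2.2 (i, j) = ClS m n picture {(i, j)} := by
      rw [clS_singleton, reachAv_empty_of_closed hVcl hcond.2]
    dsimp only at hA
    rw [hA, hB, ← hR]
    refine ⟨rfl, ?_, ?_⟩
    · exact Finset.union_subset hVg reach_subset_gd
    · intro x hx y hxy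
      rcases Finset.mem_union.1 hx with hx' | hx'
      · exact Finset.mem_union_left _ (hVcl x hx' y hxy)
      · by_cases hy : y ∈ st.2.2
        · exact Finset.mem_union_left _ hy
        · exact Finset.mem_union_right _ (reach_closed hx' ⟨hxy, hy⟩)
  · rw [if_neg hcond, if_neg hcond]
    exact ⟨rfl, hVg, hVcl⟩

theorem row_fold (m n : Int) (picture : List (List Int)) (i : Int) (hi : 0 ≤ i ∧ i < m) :
    ∀ (l : List Int), (∀ j ∈ l, 0 ≤ j ∧ j < n) →
    ∀ (st : Int × Int × Finset (Int × Int)), InvO m n picture st.2.2 →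
      List.foldl (fun st j => bodyA m n picture st i j) st l =
        List.foldl (fun st j => bodyB m n picture st i j) st l ∧
      InvO m n picture (List.foldl (fun st j => bodyA m n picture st i j) st l).2.2 := by
  intro l
  induction l with
  | nil => exact fun _ st h => ⟨rfl, h⟩
  | cons j l ihl =>
    intro hl st hst
    have hj := hl j (List.mem_cons_self)
    have hij : (i, j) ∈ Gd m n := (mem_Gd m n (i, j)).2 ⟨hi.1, hi.2, hj.1, hj.2⟩
    obtain ⟨heq, hinv⟩ := cell_step m n picture st i j hij hst
    simp only [List.foldl_cons, ← heq]
    exact ihl (fun x hx => hl x (List.mem_cons_of_mem _ hx)) _ hinv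

theorem grid_fold (m n : Int) (picture : List (List Int)) :
    ∀ (l : List Int), (∀ i ∈ l, 0 ≤ i ∧ i < m) →
    ∀ (st : Int × Int × Finset (Int × Int)), InvO m n picture st.2.2 →
      List.foldl (fun st i =>
          List.foldl (fun st j => bodyA m n picture st i j) st (PySem.List.pyRange 0 n 1)) st l =
        List.foldl (fun st i =>
          List.foldl (fun st j => bodyB m n picture st i j) st (PySem.List.pyRange 0 n 1)) st l ∧
      InvO m n picture (List.foldl (fun st i =>
          List.foldl (fun st j => bodyA m n picture st i j) st (PySem.List.pyRange 0 n 1)) st l).2.2 := by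
  intro l
  induction l with
  | nil => exact fun _ st h => ⟨rfl, h⟩
  | cons i l ihl =>
    intro hl st hst
    have hi := hl i (List.mem_cons_self)
    have hrange : ∀ j ∈ PySem.List.pyRange 0 n 1, 0 ≤ j ∧ j < n := by
      intro j hj
      have := (PySem.List.mem_pyRange_one).1 hj
      omega
    obtain ⟨heq, hinv⟩ := row_fold m n picture i hi (PySem.List.pyRange 0 n 1) hrange st hst
    simp only [List.foldl_cons, ← heq]
    exact ihl (fun x hx => hl x (List.mem_cons_of_mem _ hx)) _ hinv

theorem solution_eq_alt (m n : Int) (picture : List (List Int)) :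
    solution m n picture = solution_alt m n picture := by
  have hrange : ∀ i ∈ PySem.List.pyRange 0 m 1, 0 ≤ i ∧ i < m := by
    intro i hi
    have := (PySem.List.mem_pyRange_one).1 hi
    omega
  have hinv : InvO m n picture (∅ : Finset (Int × Int)) := by
    constructor
    · exact Finset.empty_subset _
    · intro x hx; simp at hx
  obtain ⟨heq, _⟩ := grid_fold m n picture (PySem.List.pyRange 0 m 1) hrange
    ((0 : Int), (0 : Int), (∅ : Finset (Int × Int))) hinv
  simp only [solution, solution_alt, heq]

-- ===== VERDICT (by name: the statement is the Claim_ definition above) =====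
theorem solution_spec : Claim_equal_solution := by
  intro m n picture _ _
  unfold Spec_solution
  exact solution_eq_alt m n picture
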